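-- pv_equiv track=rewrite | github.com/epilectrik/voynich | phases/A_REGIME_STRATIFICATION/regime_stratification_tests.py | extract_morphology
-- ===== SOURCE A (Python) =====
-- PREFIXES = ['qok', 'qo', 'ok', 'ot', 'ch', 'sh', 'ck', 'ct', 'cth', 'yk', 'yt',
--             'dch', 'kch', 'pch', 'tch', 'fch', 'lch', 's', 'k', 'd', 'l', 'r', 'y']
--
-- SUFFIXES = ['aiin', 'ain', 'iin', 'in', 'ol', 'al', 'or', 'ar', 'dy', 'chy',
--             'ky', 'ty', 'y', 'o', 'l', 'n', 'r', 'd', 'g', 'm', 's']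
--
-- def extract_morphology(token):
--     """Extract PREFIX, MIDDLE, SUFFIX from token."""
--     # Try prefixes (longest match first)
--     prefix = ''
--     remainder = token
--     for p in sorted(PREFIXES, key=len, reverse=True):
--         if token.startswith(p) and len(token) > len(p):
--             prefix = p
--             remainder = token[len(p):]
--             break
--
--     # Try suffixes (longest match first)
--     suffix = ''
--     for s in sorted(SUFFIXES, key=len, reverse=True):
--         if remainder.endswith(s) and len(remainder) > len(s):
--             suffix = s
--             remainder = remainder[:-len(s)]
--             break
--
--     middle = remainder
--     return prefix, middle, suffix
-- ===== SOURCE B (Python) =====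
-- PREFIXES = ['qok', 'qo', 'ok', 'ot', 'ch', 'sh', 'ck', 'ct', 'cth', 'yk', 'yt',
--             'dch', 'kch', 'pch', 'tch', 'fch', 'lch', 's', 'k', 'd', 'l', 'r', 'y']
--
-- SUFFIXES = ['aiin', 'ain', 'iin', 'in', 'ol', 'al', 'or', 'ar', 'dy', 'chy',
--             'ky', 'ty', 'y', 'o', 'l', 'n', 'r', 'd', 'g', 'm', 's']
--
-- PREFIX_SET = set(PREFIXES)
-- SUFFIX_SET = set(SUFFIXES)
-- MAX_P = max(map(len, PREFIXES))
-- MAX_S = max(map(len, SUFFIXES))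
--
--
-- def extract_morphology(token):
--     """Extract PREFIX, MIDDLE, SUFFIX from token (length-indexed set probes)."""
--     prefix = ''
--     remainder = token
--     for L in range(MAX_P, 0, -1):
--         if len(token) > L and token[:L] in PREFIX_SET:
--             prefix = token[:L]
--             remainder = token[L:]
--             break
--
--     suffix = ''
--     for L in range(MAX_S, 0, -1):
--         if len(remainder) > L and remainder[-L:] in SUFFIX_SET:
--             suffix = remainder[-L:]
--             remainder = remainder[:-L]
--             break
--
--     return prefix, remainder, suffix
-- ===== Notes on version B (the rewrite author's own statement) =====
-- stated objective: alternative
-- what changed: Replaces the scan over the length-sorted affix lists with a descent over affix lengths that probes token[:L] / remainder[-L:] against precomputed hash sets (at most one affix of a given length can match, so the first hit of the length descent is A's longest stable-sorted match).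
import Mathlib
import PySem

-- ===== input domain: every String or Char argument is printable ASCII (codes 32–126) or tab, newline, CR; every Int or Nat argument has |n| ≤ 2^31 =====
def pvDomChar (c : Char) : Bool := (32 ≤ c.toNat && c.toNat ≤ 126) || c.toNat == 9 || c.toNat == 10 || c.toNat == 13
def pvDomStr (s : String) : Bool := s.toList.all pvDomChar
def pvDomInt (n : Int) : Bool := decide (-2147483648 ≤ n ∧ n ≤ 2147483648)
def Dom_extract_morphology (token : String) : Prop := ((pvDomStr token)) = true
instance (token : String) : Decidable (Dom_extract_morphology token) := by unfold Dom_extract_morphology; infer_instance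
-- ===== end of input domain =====

-- B replaces A's scan over the length-sorted affix lists by a descent over affix lengths
-- probing token[:L] / remainder[-L:] against precomputed sets (objective: alternative).

-- ===== PORT A =====
def pvPREFIXES : List String := ["qok", "qo", "ok", "ot", "ch", "sh", "ck", "ct", "cth", "yk", "yt",
  "dch", "kch", "pch", "tch", "fch", "lch", "s", "k", "d", "l", "r", "y"]

def pvSUFFIXES : List String := ["aiin", "ain", "iin", "in", "ol", "al", "or", "ar", "dy", "chy",
  "ky", "ty", "y", "o", "l", "n", "r", "d", "g", "m", "s"]

-- A's 'for p in …: if token.startswith(p) and len(token) > len(p): …; break' loop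
def pvScanPrefix (token : String) : List String → String × String
  | [] => ("", token)
  | p :: ps =>
    if PySem.Str.startswith token p = true ∧ PySem.Str.len token > PySem.Str.len p then
      (p, PySem.Str.slice token (some (PySem.Str.len p)) none)
    else pvScanPrefix token ps

-- A's 'for s in …: if remainder.endswith(s) and len(remainder) > len(s): …; break' loop
def pvScanSuffix (remainder : String) : List String → String × String
  | [] => ("", remainder)
  | s :: ss =>
    if PySem.Str.endswith remainder s = true ∧ PySem.Str.len remainder > PySem.Str.len s then
      (s, PySem.Str.slice remainder none (some (-(PySem.Str.len s))))
    else pvScanSuffix remainder ss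

def extract_morphology (token : String) : String × String × String :=
  let pr := pvScanPrefix token (PySem.List.sorted pvPREFIXES PySem.Str.len true)
  let sm := pvScanSuffix pr.2 (PySem.List.sorted pvSUFFIXES PySem.Str.len true)
  (pr.1, sm.2, sm.1)

-- ===== PORT B =====
def pvPrefixSet : PySem.Set String := PySem.Set.ofList pvPREFIXES
def pvSuffixSet : PySem.Set String := PySem.Set.ofList pvSUFFIXES
-- max(map(len, …)) of a nonempty literal list; the .getD default is never reached
def pvMaxP : Int := (PySem.List.max? (pvPREFIXES.map PySem.Str.len) (fun x => x)).getD 0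
def pvMaxS : Int := (PySem.List.max? (pvSUFFIXES.map PySem.Str.len) (fun x => x)).getD 0

-- B's 'for L in range(MAX_P, 0, -1): if len(token) > L and token[:L] in PREFIX_SET: …; break'
def pvProbePrefix (token : String) : List Int → String × String
  | [] => ("", token)
  | L :: Ls =>
    if PySem.Str.len token > L ∧ PySem.Set.contains pvPrefixSet (PySem.Str.slice token none (some L)) = true then
      (PySem.Str.slice token none (some L), PySem.Str.slice token (some L) none)
    else pvProbePrefix token Ls

-- B's 'for L in range(MAX_S, 0, -1): if len(remainder) > L and remainder[-L:] in SUFFIX_SET: …; break'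
def pvProbeSuffix (remainder : String) : List Int → String × String
  | [] => ("", remainder)
  | L :: Ls =>
    if PySem.Str.len remainder > L ∧ PySem.Set.contains pvSuffixSet (PySem.Str.slice remainder (some (-L)) none) = true then
      (PySem.Str.slice remainder (some (-L)) none, PySem.Str.slice remainder none (some (-L)))
    else pvProbeSuffix remainder Ls

def extract_morphology_alt (token : String) : String × String × String :=
  let pr := pvProbePrefix token (PySem.List.pyRange pvMaxP 0 (-1))
  let sm := pvProbeSuffix pr.2 (PySem.List.pyRange pvMaxS 0 (-1))
  (pr.1, sm.2, sm.1)

-- ===== PRECONDITION & SPEC =====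
def Spec_extract_morphology (token : String) (out : String × String × String) : Prop := out = extract_morphology_alt token
instance (token : String) (out : String × String × String) : Decidable (Spec_extract_morphology token out) := by unfold Spec_extract_morphology; infer_instance

-- ===== CLAIM (what is proved, stated in full; the proofs are below) =====
def Claim_equal_extract_morphology : Prop := ∀ (token : String), Dom_extract_morphology token → Spec_extract_morphology token (extract_morphology token)

-- ===== LEMMAS AND PROOFS =====

-- the length groups of the two affix lists, in original (= stable-sorted) order
def pvP3s : List String := ["qok", "cth", "dch", "kch", "pch", "tch", "fch", "lch"]
def pvP2s : List String := ["qo", "ok", "ot", "ch", "sh", "ck", "ct", "yk", "yt"]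
def pvP1s : List String := ["s", "k", "d", "l", "r", "y"]
def pvS4s : List String := ["aiin"]
def pvS3s : List String := ["ain", "iin", "chy"]
def pvS2s : List String := ["in", "ol", "al", "or", "ar", "dy", "ky", "ty"]
def pvS1s : List String := ["y", "o", "l", "n", "r", "d", "g", "m", "s"]

lemma pvOfListToList (s : String) : String.ofList s.toList = s := by
  simp

lemma pvMemMapToList (x : String) (l : List String) :
    x ∈ l ↔ x.toList ∈ l.map String.toList := by
  constructor
  · exact fun h => List.mem_map_of_mem h
  · intro h
    rcases List.mem_map.mp h with ⟨a, ha, he⟩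
    exact String.toList_inj.mp he ▸ ha

lemma pvSliceTake (t : String) (L : Nat) :
    PySem.Str.slice t none (some (L : Int)) = String.ofList (t.toList.take L) := by
  refine String.toList_inj.mp ?_
  rw [PySem.Str.toList_slice, PySem.Chars.slice_eq_listSlice,
      PySem.List.slice_to _ (by exact_mod_cast Int.natCast_nonneg L)]
  simp

lemma pvSliceDropNeg (t : String) (L : Nat) (hL : 0 < L) :
    PySem.Str.slice t (some (-(L : Int))) none = String.ofList (t.toList.drop (t.toList.length - L)) := by
  refine String.toList_inj.mp ?_
  rw [PySem.Str.toList_slice, PySem.Chars.slice_eq_listSlice,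
      PySem.List.slice_from_neg_natCast _ L hL]
  simp

lemma pvScanPrefix_group (t : String) (L : Nat) (ps rest : List String)
    (hps : ∀ p ∈ ps, p.toList.length = L) :
    pvScanPrefix t (ps ++ rest) =
      if L < t.toList.length ∧ t.toList.take L ∈ ps.map String.toList then
        (String.ofList (t.toList.take L), PySem.Str.slice t (some (L : Int)) none)
      else pvScanPrefix t rest := by
  induction ps with
  | nil => simp
  | cons p ps ih =>
    have hp : p.toList.length = L := hps p (by simp)
    have hcond : (PySem.Str.startswith t p = true ∧ PySem.Str.len t > PySem.Str.len p)
        ↔ (L < t.toList.length ∧ t.toList.take L = p.toList) := by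
      rw [PySem.Str.startswith_eq, PySem.Chars.startswith_iff, List.prefix_iff_eq_take, hp,
          PySem.Str.len_eq, PySem.Str.len_eq, hp]
      constructor
      · rintro ⟨h1, h2⟩; exact ⟨by exact_mod_cast h2, h1.symm⟩
      · rintro ⟨h1, h2⟩; exact ⟨h2.symm, by exact_mod_cast h1⟩
    rw [List.cons_append]
    simp only [pvScanPrefix]
    by_cases hc : L < t.toList.length ∧ t.toList.take L = p.toList
    · rw [if_pos (hcond.mpr hc),
          if_pos ⟨hc.1, by rw [hc.2]; exact List.mem_map_of_mem (by simp)⟩,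
          hc.2, PySem.Str.len_eq, hp, pvOfListToList]
    · rw [if_neg (fun h => hc (hcond.mp h)), ih (fun q hq => hps q (by simp [hq]))]
      by_cases h2 : L < t.toList.length ∧ t.toList.take L ∈ ps.map String.toList
      · rw [if_pos h2, if_pos ⟨h2.1, by simp only [List.map_cons, List.mem_cons]; exact Or.inr h2.2⟩]
      · rw [if_neg h2, if_neg (by
          rintro ⟨hn, hm⟩
          simp only [List.map_cons, List.mem_cons] at hm
          rcases hm with he | hm2
          · exact hc ⟨hn, he⟩
          · exact h2 ⟨hn, hm2⟩)]

lemma pvScanSuffix_group (r : String) (L : Nat) (ss rest : List String)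
    (hss : ∀ s ∈ ss, s.toList.length = L) :
    pvScanSuffix r (ss ++ rest) =
      if L < r.toList.length ∧ r.toList.drop (r.toList.length - L) ∈ ss.map String.toList then
        (String.ofList (r.toList.drop (r.toList.length - L)), PySem.Str.slice r none (some (-(L : Int))))
      else pvScanSuffix r rest := by
  induction ss with
  | nil => simp
  | cons s ss ih =>
    have hp : s.toList.length = L := hss s (by simp)
    have hcond : (PySem.Str.endswith r s = true ∧ PySem.Str.len r > PySem.Str.len s)
        ↔ (L < r.toList.length ∧ r.toList.drop (r.toList.length - L) = s.toList) := by
      rw [PySem.Str.endswith_eq, PySem.Chars.endswith_iff, List.suffix_iff_eq_drop, hp,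
          PySem.Str.len_eq, PySem.Str.len_eq, hp]
      constructor
      · rintro ⟨h1, h2⟩; exact ⟨by exact_mod_cast h2, h1.symm⟩
      · rintro ⟨h1, h2⟩; exact ⟨h2.symm, by exact_mod_cast h1⟩
    rw [List.cons_append]
    simp only [pvScanSuffix]
    by_cases hc : L < r.toList.length ∧ r.toList.drop (r.toList.length - L) = s.toList
    · rw [if_pos (hcond.mpr hc),
          if_pos ⟨hc.1, by rw [hc.2]; exact List.mem_map_of_mem (by simp)⟩,
          hc.2, PySem.Str.len_eq, hp, pvOfListToList]
    · rw [if_neg (fun h => hc (hcond.mp h)), ih (fun q hq => hss q (by simp [hq]))]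
      by_cases h2 : L < r.toList.length ∧ r.toList.drop (r.toList.length - L) ∈ ss.map String.toList
      · rw [if_pos h2, if_pos ⟨h2.1, by simp only [List.map_cons, List.mem_cons]; exact Or.inr h2.2⟩]
      · rw [if_neg h2, if_neg (by
          rintro ⟨hn, hm⟩
          simp only [List.map_cons, List.mem_cons] at hm
          rcases hm with he | hm2
          · exact hc ⟨hn, he⟩
          · exact h2 ⟨hn, hm2⟩)]

lemma pvProbeCondP (t : String) (L : Nat) (g : List String)
    (hg : (pvPREFIXES.map String.toList).filter (fun cs => cs.length == L) = g.map String.toList) :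
    (PySem.Str.len t > (L : Int) ∧
        PySem.Set.contains pvPrefixSet (PySem.Str.slice t none (some (L : Int))) = true)
      ↔ (L < t.toList.length ∧ t.toList.take L ∈ g.map String.toList) := by
  have hx : (PySem.Str.slice t none (some (L : Int))).toList = t.toList.take L := by
    rw [PySem.Str.toList_slice, PySem.Chars.slice_eq_listSlice,
        PySem.List.slice_to _ (by exact_mod_cast Int.natCast_nonneg L)]
    simp
  have hcontains : PySem.Set.contains pvPrefixSet (PySem.Str.slice t none (some (L : Int))) = true
      ↔ (PySem.Str.slice t none (some (L : Int))) ∈ pvPREFIXES := by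
    simp only [pvPrefixSet, PySem.Set.contains, List.contains_eq_mem, PySem.Set.mem_ofList,
      decide_eq_true_eq]
  rw [PySem.Str.len_eq, hcontains, pvMemMapToList, hx]
  constructor
  · rintro ⟨h1, h2⟩
    have hn : L < t.toList.length := by exact_mod_cast h1
    have hlen : (t.toList.take L).length = L := by
      rw [List.length_take]; omega
    have hf : t.toList.take L ∈ (pvPREFIXES.map String.toList).filter (fun cs => cs.length == L) :=
      List.mem_filter.mpr ⟨h2, by simp only [hlen, beq_self_eq_true]⟩
    rw [hg] at hf
    exact ⟨hn, hf⟩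
  · rintro ⟨hn, hm⟩
    rw [← hg] at hm
    exact ⟨by exact_mod_cast hn, (List.mem_filter.mp hm).1⟩

lemma pvProbeCondS (r : String) (L : Nat) (hL : 0 < L) (g : List String)
    (hg : (pvSUFFIXES.map String.toList).filter (fun cs => cs.length == L) = g.map String.toList) :
    (PySem.Str.len r > (L : Int) ∧
        PySem.Set.contains pvSuffixSet (PySem.Str.slice r (some (-(L : Int))) none) = true)
      ↔ (L < r.toList.length ∧ r.toList.drop (r.toList.length - L) ∈ g.map String.toList) := by
  have hx : (PySem.Str.slice r (some (-(L : Int))) none).toList = r.toList.drop (r.toList.length - L) := by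
    rw [PySem.Str.toList_slice, PySem.Chars.slice_eq_listSlice,
        PySem.List.slice_from_neg_natCast _ L hL]
  have hcontains : PySem.Set.contains pvSuffixSet (PySem.Str.slice r (some (-(L : Int))) none) = true
      ↔ (PySem.Str.slice r (some (-(L : Int))) none) ∈ pvSUFFIXES := by
    simp only [pvSuffixSet, PySem.Set.contains, List.contains_eq_mem, PySem.Set.mem_ofList,
      decide_eq_true_eq]
  rw [PySem.Str.len_eq, hcontains, pvMemMapToList, hx]
  constructor
  · rintro ⟨h1, h2⟩
    have hn : L < r.toList.length := by exact_mod_cast h1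
    have hlen : (r.toList.drop (r.toList.length - L)).length = L := by
      rw [List.length_drop]; omega
    have hf : r.toList.drop (r.toList.length - L)
        ∈ (pvSUFFIXES.map String.toList).filter (fun cs => cs.length == L) :=
      List.mem_filter.mpr ⟨h2, by simp only [hlen, beq_self_eq_true]⟩
    rw [hg] at hf
    exact ⟨hn, hf⟩
  · rintro ⟨hn, hm⟩
    rw [← hg] at hm
    exact ⟨by exact_mod_cast hn, (List.mem_filter.mp hm).1⟩

lemma pvPrefixMain (t : String) :
    pvScanPrefix t (PySem.List.sorted pvPREFIXES PySem.Str.len true)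
      = pvProbePrefix t (PySem.List.pyRange pvMaxP 0 (-1)) := by
  have hs : PySem.List.sorted pvPREFIXES PySem.Str.len true
      = pvP3s ++ (pvP2s ++ (pvP1s ++ [])) := by decide
  have hr : PySem.List.pyRange pvMaxP 0 (-1) = [3, 2, 1] := by decide
  rw [hs, hr,
      pvScanPrefix_group t 3 pvP3s _ (by decide),
      pvScanPrefix_group t 2 pvP2s _ (by decide),
      pvScanPrefix_group t 1 pvP1s _ (by decide)]
  have hc3 := pvProbeCondP t 3 pvP3s (by decide)
  have hc2 := pvProbeCondP t 2 pvP2s (by decide)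
  have hc1 := pvProbeCondP t 1 pvP1s (by decide)
  have hv3 := pvSliceTake t 3
  have hv2 := pvSliceTake t 2
  have hv1 := pvSliceTake t 1
  simp only [Nat.cast_ofNat, Nat.cast_one] at hc3 hc2 hc1 hv3 hv2 hv1 ⊢
  rw [hv3] at hc3
  rw [hv2] at hc2
  rw [hv1] at hc1
  simp only [pvProbePrefix, pvScanPrefix, hv3, hv2, hv1, hc3, hc2, hc1]

lemma pvSuffixMain (r : String) :
    pvScanSuffix r (PySem.List.sorted pvSUFFIXES PySem.Str.len true)
      = pvProbeSuffix r (PySem.List.pyRange pvMaxS 0 (-1)) := by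
  have hs : PySem.List.sorted pvSUFFIXES PySem.Str.len true
      = pvS4s ++ (pvS3s ++ (pvS2s ++ (pvS1s ++ []))) := by decide
  have hr : PySem.List.pyRange pvMaxS 0 (-1) = [4, 3, 2, 1] := by decide
  rw [hs, hr,
      pvScanSuffix_group r 4 pvS4s _ (by decide),
      pvScanSuffix_group r 3 pvS3s _ (by decide),
      pvScanSuffix_group r 2 pvS2s _ (by decide),
      pvScanSuffix_group r 1 pvS1s _ (by decide)]
  have hc4 := pvProbeCondS r 4 (by norm_num) pvS4s (by decide)
  have hc3 := pvProbeCondS r 3 (by norm_num) pvS3s (by decide)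
  have hc2 := pvProbeCondS r 2 (by norm_num) pvS2s (by decide)
  have hc1 := pvProbeCondS r 1 (by norm_num) pvS1s (by decide)
  have hv4 := pvSliceDropNeg r 4 (by norm_num)
  have hv3 := pvSliceDropNeg r 3 (by norm_num)
  have hv2 := pvSliceDropNeg r 2 (by norm_num)
  have hv1 := pvSliceDropNeg r 1 (by norm_num)
  simp only [Nat.cast_ofNat, Nat.cast_one] at hc4 hc3 hc2 hc1 hv4 hv3 hv2 hv1 ⊢
  rw [hv4] at hc4
  rw [hv3] at hc3
  rw [hv2] at hc2
  rw [hv1] at hc1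
  simp only [pvProbeSuffix, pvScanSuffix, hv4, hv3, hv2, hv1, hc4, hc3, hc2, hc1]

-- ===== VERDICT (by name: the statement is the Claim_ definition above) =====
theorem extract_morphology_spec : Claim_equal_extract_morphology := by
  intro token _
  show extract_morphology token = extract_morphology_alt token
  simp only [extract_morphology, extract_morphology_alt]
  rw [pvPrefixMain, pvSuffixMain]
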